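-- pv_equiv track=rewrite | github.com/nermadie/CodeForces_Solutions | Utils/BinarySearch.py | bs_last_exact_desc
-- ===== SOURCE A (Python) =====
-- def _init_lr(arr, l, r):
--     if l is None:
--         l = 0
--     if r is None:
--         r = len(arr) - 1
--     return l, r
--
-- def bs_last_exact_desc(arr, x, l=None, r=None):
--     l, r = _init_lr(arr, l, r)
--     res = -1
--     while l <= r:
--         m = (l + r) // 2
--         if arr[m] == x:
--             res = m
--             l = m + 1
--         elif arr[m] < x:
--             r = m - 1
--         else:
--             l = m + 1
--     return res
-- ===== SOURCE B (Python) =====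
-- def bs_last_exact_desc(arr, x, l=None, r=None):
--     base = 0 if l is None else l
--     lo = base
--     hi = (len(arr) - 1 if r is None else r) + 1  # exclusive upper end
--     # boundary search: smallest k in [base, hi] with arr[k] < x (k = hi if none)
--     while lo < hi:
--         m = (lo + hi) // 2
--         if arr[m] < x:
--             hi = m
--         else:
--             lo = m + 1
--     k = lo - 1
--     return k if k >= base and arr[k] == x else -1
-- ===== Notes on version B (the rewrite author's own statement) =====
-- stated objective: alternative
-- what changed: B replaces A's three-way branch with a best-so-far res variable by a single boundary binary search over a half-open window: it maintains only the partition point (smallest k with arr[k] < x) with a two-way branch and no result variable, and performs the equality test once, outside the loop, on arr[k-1]. Pre_ restricts to the function's natural domain (an empty interval, or bounds inside [0,len) on a non-increasing array): outside it A raises IndexError or returns a value that is an artefact of its probe order on unsorted input or of negative-index wraparound.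
-- outside the precondition, e.g. on bs_last_exact_desc([1, 5], 5, None, None): A returns -1, B returns 1; on bs_last_exact_desc([1, 2], 1, -5, 1): A returns 0, B returns -1
import Mathlib
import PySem

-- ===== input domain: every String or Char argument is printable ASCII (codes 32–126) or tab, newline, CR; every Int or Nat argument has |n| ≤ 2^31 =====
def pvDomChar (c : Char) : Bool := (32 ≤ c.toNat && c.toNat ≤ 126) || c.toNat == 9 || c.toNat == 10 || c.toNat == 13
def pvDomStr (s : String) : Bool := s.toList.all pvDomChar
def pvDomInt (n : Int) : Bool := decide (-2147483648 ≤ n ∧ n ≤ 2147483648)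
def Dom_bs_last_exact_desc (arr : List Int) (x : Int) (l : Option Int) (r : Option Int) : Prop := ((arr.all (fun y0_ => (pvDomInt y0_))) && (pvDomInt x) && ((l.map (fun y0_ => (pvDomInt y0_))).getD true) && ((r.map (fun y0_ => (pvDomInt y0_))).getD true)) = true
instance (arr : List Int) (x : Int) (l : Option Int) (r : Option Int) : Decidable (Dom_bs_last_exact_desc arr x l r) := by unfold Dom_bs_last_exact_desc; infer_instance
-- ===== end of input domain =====

-- B is a single boundary binary search with a two-way branch and no best-so-far variable: it
-- narrows a half-open window to the partition point k = first index with arr[k] < x, then tests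
-- arr[k-1] == x once, outside the loop; equal to A on descending arrays with in-range bounds.
-- (Both while loops carry a fuel argument = the interval size, a totality guard only: it is
-- never exhausted before the loop condition fails.)

-- ===== PORT A =====
def init_lr (arr : List Int) (l : Option Int) (r : Option Int) : Int × Int :=
  (match l with | none => 0 | some v => v,
   match r with | none => (arr.length : Int) - 1 | some v => v)

-- A's while loop; at an index Python would raise on (pyGet? = none) the value is unclaimed (outside Pre_)
def bsLoopA (arr : List Int) (x : Int) : Nat → Int → Int → Int → Int
  | 0, _, _, res => res
  | fuel + 1, l, r, res =>
    if l ≤ r then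
      match PySem.List.pyGet? arr (PySem.Int.floordiv (l + r) 2) with
      | none => res
      | some v =>
        if v == x then bsLoopA arr x fuel (PySem.Int.floordiv (l + r) 2 + 1) r (PySem.Int.floordiv (l + r) 2)
        else if v < x then bsLoopA arr x fuel l (PySem.Int.floordiv (l + r) 2 - 1) res
        else bsLoopA arr x fuel (PySem.Int.floordiv (l + r) 2 + 1) r res
    else res

def bs_last_exact_desc (arr : List Int) (x : Int) (l : Option Int) (r : Option Int) : Int :=
  let lr := init_lr arr l r
  bsLoopA arr x (lr.2 - lr.1 + 1).toNat lr.1 lr.2 (-1)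

-- ===== PORT B =====
-- B's while loop over the half-open window [lo, hi): returns the partition point
def bsLoopB (arr : List Int) (x : Int) : Nat → Int → Int → Int
  | 0, lo, _ => lo
  | fuel + 1, lo, hi =>
    if lo < hi then
      match PySem.List.pyGet? arr (PySem.Int.floordiv (lo + hi) 2) with
      | none => lo  -- Python raises here; outside Pre_
      | some v =>
        if v < x then bsLoopB arr x fuel lo (PySem.Int.floordiv (lo + hi) 2)
        else bsLoopB arr x fuel (PySem.Int.floordiv (lo + hi) 2 + 1) hi
    else lo

def bs_last_exact_desc_alt (arr : List Int) (x : Int) (l : Option Int) (r : Option Int) : Int :=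
  let base : Int := match l with | none => 0 | some v => v
  let hi : Int := (match r with | none => (arr.length : Int) - 1 | some v => v) + 1
  let k : Int := bsLoopB arr x (hi - base).toNat base hi - 1
  if base ≤ k then
    match PySem.List.pyGet? arr k with  -- Python raises on none; outside Pre_
    | none => -1
    | some v => if v == x then k else -1
  else -1

-- ===== PRECONDITION & SPEC =====
-- Pre_ restricts to the function's natural domain (its name says 'desc'): either the search
-- interval [l0, r0] is empty, or it lies inside [0, len) and arr is sorted non-increasing.
-- Outside it A either raises IndexError or returns a value that is an artefact of its probe
-- order (unsorted input) or of negative-index wraparound, which no caller would specify.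
def Pre_bs_last_exact_desc (arr : List Int) (x : Int) (l : Option Int) (r : Option Int) : Prop :=
  let l0 : Int := l.getD 0
  let r0 : Int := r.getD ((arr.length : Int) - 1)
  r0 < l0 ∨ (0 ≤ l0 ∧ r0 < (arr.length : Int) ∧ arr.Pairwise (fun a b => b ≤ a))
instance (arr : List Int) (x : Int) (l : Option Int) (r : Option Int) : Decidable (Pre_bs_last_exact_desc arr x l r) := by unfold Pre_bs_last_exact_desc; infer_instance

def pvWitness_bs_last_exact_desc : List Int × Int × Option Int × Option Int := ([9, 7, 7, 3], 7, none, none)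

def Spec_bs_last_exact_desc (arr : List Int) (x : Int) (l : Option Int) (r : Option Int) (out : Int) : Prop := out = bs_last_exact_desc_alt arr x l r
instance (arr : List Int) (x : Int) (l : Option Int) (r : Option Int) (out : Int) : Decidable (Spec_bs_last_exact_desc arr x l r out) := by unfold Spec_bs_last_exact_desc; infer_instance

-- ===== CLAIM (what is proved, stated in full; the proofs are below) =====
def Claim_equal_bs_last_exact_desc : Prop := ∀ (arr : List Int) (x : Int) (l : Option Int) (r : Option Int), Dom_bs_last_exact_desc arr x l r → Pre_bs_last_exact_desc arr x l r → Spec_bs_last_exact_desc arr x l r (bs_last_exact_desc arr x l r)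

-- ===== LEMMAS AND PROOFS =====

-- arr[i] as a total function on in-range indices
def getI (arr : List Int) (i : Int) : Int := (PySem.List.pyGet? arr i).getD 0

theorem getI_some (arr : List Int) (i : Int) (h0 : 0 ≤ i) (h1 : i < (arr.length : Int)) :
    PySem.List.pyGet? arr i = some (getI arr i) := by
  have h := PySem.List.pyGet?_eq_some_getElem arr (i := i) h0 h1
  rw [getI, h]
  rfl

-- non-increasing order, stated on Int indices
theorem sorted_getI (arr : List Int) (hs : arr.Pairwise (fun a b => b ≤ a))
    (i j : Int) (h0 : 0 ≤ i) (hij : i ≤ j) (hj : j < (arr.length : Int)) :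
    getI arr j ≤ getI arr i := by
  have hi' : i.toNat < arr.length := by omega
  have hj' : j.toNat < arr.length := by omega
  have hget : ∀ (k : Int) (hk : k.toNat < arr.length), 0 ≤ k → getI arr k = arr[k.toNat] := by
    intro k hk hk0
    rw [getI, PySem.List.pyGet?_eq_some_getElem arr (i := k) hk0 (by omega)]
    rfl
  rw [hget i hi' h0, hget j hj' (by omega)]
  rcases Nat.lt_or_ge i.toNat j.toNat with hlt | hge
  · exact (List.pairwise_iff_getElem.mp hs) i.toNat j.toNat hi' hj' hlt
  · have : i.toNat = j.toNat := by omega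
    simp [this]

-- the partition-point property both loops establish
def PartAt (arr : List Int) (x l0 r0 lf : Int) : Prop :=
  l0 ≤ lf ∧ lf ≤ r0 + 1 ∧ (∀ i : Int, l0 ≤ i → i < lf → x ≤ getI arr i) ∧
    (∀ i : Int, lf ≤ i → i ≤ r0 → getI arr i < x)

theorem partAt_uniq (arr : List Int) (x l0 r0 a b : Int)
    (ha : PartAt arr x l0 r0 a) (hb : PartAt arr x l0 r0 b) : a = b := by
  obtain ⟨ha1, ha2, ha3, ha4⟩ := ha
  obtain ⟨hb1, hb2, hb3, hb4⟩ := hb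
  by_contra hne
  rcases lt_trichotomy a b with h | h | h
  · have h1 := hb3 a ha1 h
    have h2 := ha4 a (le_refl a) (by omega)
    omega
  · exact hne h
  · have h1 := ha3 b hb1 h
    have h2 := hb4 b (le_refl b) (by omega)
    omega

theorem bsLoopB_part (arr : List Int) (x l0 r0 : Int)
    (hb : 0 ≤ l0) (hr : r0 < (arr.length : Int))
    (hs : arr.Pairwise (fun a b => b ≤ a)) :
    ∀ (fuel : Nat) (lo hi : Int),
      l0 ≤ lo → hi ≤ r0 + 1 → lo ≤ hi → (hi - lo).toNat ≤ fuel →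
      (∀ i : Int, l0 ≤ i → i < lo → x ≤ getI arr i) →
      (∀ i : Int, hi ≤ i → i ≤ r0 → getI arr i < x) →
      PartAt arr x l0 r0 (bsLoopB arr x fuel lo hi) := by
  intro fuel
  induction fuel with
  | zero =>
    intro lo hi hlo hhi hlh hf hleft hright
    have hlh' : lo = hi := by omega
    simp only [bsLoopB]
    exact ⟨hlo, by omega, hleft, fun i h1 h2 => hright i (by omega) h2⟩
  | succ fuel ih =>
    intro lo hi hlo hhi hlh hf hleft hright
    rw [bsLoopB]
    by_cases h : lo < hi
    · have hm1 : lo ≤ PySem.Int.floordiv (lo + hi) 2 :=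
        (PySem.Int.le_floordiv_iff_mul_le (by omega)).mpr (by omega)
      have hm2 : PySem.Int.floordiv (lo + hi) 2 < hi :=
        (PySem.Int.floordiv_lt_iff_lt_mul (by omega)).mpr (by omega)
      set m := PySem.Int.floordiv (lo + hi) 2 with hmdef
      have hg := getI_some arr m (by omega) (by omega)
      simp only [if_pos h, hg]
      by_cases hv : getI arr m < x
      · simp only [if_pos hv]
        exact ih lo m hlo (by omega) (by omega) (by omega) hleft
          (fun i h1 h2 => lt_of_le_of_lt (sorted_getI arr hs m i (by omega) h1 (by omega)) hv)
      · simp only [if_neg hv]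
        exact ih (m + 1) hi (by omega) hhi (by omega) (by omega)
          (fun i h1 h2 => by
            by_cases hi2 : i < lo
            · exact hleft i h1 hi2
            · exact le_trans (by omega : x ≤ getI arr m)
                (sorted_getI arr hs i m (by omega) (by omega) (by omega)))
          hright
    · simp only [if_neg h]
      exact ⟨hlo, by omega, hleft, fun i h1 h2 => hright i (by omega) h2⟩

theorem bsLoopA_part (arr : List Int) (x l0 r0 : Int)
    (hb : 0 ≤ l0) (hrr : r0 < (arr.length : Int))
    (hs : arr.Pairwise (fun a b => b ≤ a)) :
    ∀ (fuel : Nat) (l r res : Int),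
      l0 ≤ l → r ≤ r0 → l ≤ r + 1 → (r - l + 1).toNat ≤ fuel →
      (∀ i : Int, l0 ≤ i → i < l → x ≤ getI arr i) →
      (∀ i : Int, r < i → i ≤ r0 → getI arr i < x) →
      res = (if l0 < l ∧ getI arr (l - 1) = x then l - 1 else -1) →
      ∃ lf, PartAt arr x l0 r0 lf ∧
        bsLoopA arr x fuel l r res = (if l0 < lf ∧ getI arr (lf - 1) = x then lf - 1 else -1) := by
  intro fuel
  induction fuel with
  | zero =>
    intro l r res hl hr hlr hf hleft hright hres
    refine ⟨l, ⟨hl, by omega, hleft, fun i h1 h2 => hright i (by omega) h2⟩, hres⟩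
  | succ fuel ih =>
    intro l r res hl hr hlr hf hleft hright hres
    rw [bsLoopA]
    by_cases h : l ≤ r
    · have hmb := PySem.Int.floordiv_two_mid_bounds h
      set m := PySem.Int.floordiv (l + r) 2 with hmdef
      have hg := getI_some arr m (by omega) (by omega)
      simp only [if_pos h, hg]
      by_cases hveq : getI arr m = x
      · have hbt : (getI arr m == x) = true := beq_iff_eq.mpr hveq
        simp only [hbt, if_true]
        refine ih (m + 1) r m (by omega) hr (by omega) (by omega)
          (fun i h1 h2 => by
            by_cases hi2 : i < l
            · exact hleft i h1 hi2
            · calc x = getI arr m := hveq.symm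
                _ ≤ getI arr i := sorted_getI arr hs i m (by omega) (by omega) (by omega))
          hright ?_
        simp only [add_sub_cancel_right]
        rw [if_pos ⟨by omega, hveq⟩]
      · have hbf : (getI arr m == x) = false := beq_eq_false_iff_ne.mpr hveq
        simp only [hbf, Bool.false_eq_true, if_false]
        by_cases hvlt : getI arr m < x
        · simp only [if_pos hvlt]
          exact ih l (m - 1) res hl (by omega) (by omega) (by omega)
            hleft
            (fun i h1 h2 => lt_of_le_of_lt (sorted_getI arr hs m i (by omega) (by omega) (by omega)) hvlt)
            hres
        · simp only [if_neg hvlt]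
          refine ih (m + 1) r res (by omega) hr (by omega) (by omega)
            (fun i h1 h2 => by
              by_cases hi2 : i < l
              · exact hleft i h1 hi2
              · have := sorted_getI arr hs i m (by omega) (by omega) (by omega)
                omega)
            hright ?_
          simp only [add_sub_cancel_right]
          rw [if_neg (by intro hc; exact hveq hc.2)]
          rw [hres]
          by_cases hc : l0 < l ∧ getI arr (l - 1) = x
          · exfalso
            have := sorted_getI arr hs (l - 1) m (by omega) (by omega) (by omega)
            omega
          · rw [if_neg hc]
    · simp only [if_neg h]
      exact ⟨l, ⟨hl, by omega, hleft, fun i h1 h2 => hright i (by omega) h2⟩, hres⟩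

theorem bs_core (arr : List Int) (x l0 r0 : Int)
    (hpre : r0 < l0 ∨ (0 ≤ l0 ∧ r0 < (arr.length : Int) ∧ arr.Pairwise (fun a b => b ≤ a))) :
    bsLoopA arr x (r0 - l0 + 1).toNat l0 r0 (-1) =
      (if l0 ≤ bsLoopB arr x (r0 + 1 - l0).toNat l0 (r0 + 1) - 1 then
        match PySem.List.pyGet? arr (bsLoopB arr x (r0 + 1 - l0).toNat l0 (r0 + 1) - 1) with
        | none => -1
        | some v => if v == x then bsLoopB arr x (r0 + 1 - l0).toNat l0 (r0 + 1) - 1 else -1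
      else -1) := by
  by_cases hempty : r0 < l0
  · have hfa : (r0 - l0 + 1).toNat = 0 := by omega
    have hfb : (r0 + 1 - l0).toNat = 0 := by omega
    rw [hfa, hfb, bsLoopA, bsLoopB]
    rw [if_neg (by omega : ¬ l0 ≤ l0 - 1)]
  · rcases hpre with hpre | ⟨hb, hr, hs⟩
    · omega
    obtain ⟨lfA, hPA, hA⟩ := bsLoopA_part arr x l0 r0 hb hr hs (r0 - l0 + 1).toNat l0 r0 (-1)
      (le_refl _) (le_refl _) (by omega) (le_refl _) (fun i h1 h2 => by omega)
      (fun i h1 h2 => by omega)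
      (by rw [if_neg (by omega : ¬ (l0 < l0 ∧ getI arr (l0 - 1) = x))])
    have hPB := bsLoopB_part arr x l0 r0 hb hr hs (r0 + 1 - l0).toNat l0 (r0 + 1)
      (le_refl _) (le_refl _) (by omega) (le_refl _) (fun i h1 h2 => by omega)
      (fun i h1 h2 => by omega)
    have hK := partAt_uniq arr x l0 r0 lfA (bsLoopB arr x (r0 + 1 - l0).toNat l0 (r0 + 1)) hPA hPB
    rw [hA, hK]
    set K := bsLoopB arr x (r0 + 1 - l0).toNat l0 (r0 + 1) with hKdef
    obtain ⟨hK1, hK2, _, _⟩ := hPB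
    by_cases hc : l0 ≤ K - 1
    · rw [if_pos hc]
      have hg := getI_some arr (K - 1) (by omega) (by omega)
      rw [hg]
      by_cases hx : getI arr (K - 1) = x
      · have hbt : (getI arr (K - 1) == x) = true := beq_iff_eq.mpr hx
        rw [if_pos ⟨by omega, hx⟩]
        simp only [hbt, if_true]
      · have hbf : (getI arr (K - 1) == x) = false := beq_eq_false_iff_ne.mpr hx
        rw [if_neg (fun hcc => hx hcc.2)]
        simp only [hbf, Bool.false_eq_true, if_false]
    · rw [if_neg hc, if_neg (by omega : ¬ (l0 < K ∧ getI arr (K - 1) = x))]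

-- ===== VERDICT (by name: the statement is the Claim_ definition above) =====
theorem bs_last_exact_desc_spec : Claim_equal_bs_last_exact_desc := by
  intro arr x l r _ hpre
  unfold Spec_bs_last_exact_desc bs_last_exact_desc bs_last_exact_desc_alt init_lr
  cases l <;> cases r <;>
    exact bs_core arr x _ _ (by simpa [Pre_bs_last_exact_desc, Option.getD] using hpre)
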